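-- pv_equiv track=rewrite | github.com/MrBrantCode/unitest_baseline | mut_generate/mist_train_taco/taco_8619/solution.py | max_removable_blocks
-- ===== SOURCE A (Python) =====
-- def max_removable_blocks(n, weights):
--     if n == 0:
--         return 0
--
--     # Initialize a 2D list to check if blocks can be removed
--     check = [[False] * n for _ in range(n)]
--
--     # Check for adjacent blocks that can be removed
--     for i in range(n - 1):
--         if abs(weights[i + 1] - weights[i]) <= 1:
--             check[i][i + 1] = True
--
--     # Check for larger segments that can be removed
--     for i in range(3, n, 2):
--         for j in range(n - i):
--             for k in range(j + 1, j + i):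
--                 if not check[j][j + i] and check[j][k] and check[k + 1][j + i]:
--                     check[j][j + i] = True
--                     break
--             if not check[j][j + i] and abs(weights[j] - weights[j + i]) <= 1 and check[j + 1][j + i - 1]:
--                 check[j][j + i] = True
--
--     # Dynamic programming array to store the maximum removable blocks up to each index
--     dp = [0] * (n + 1)
--
--     # Fill the dp array
--     for k in range(n):
--         for m in range(k):
--             if check[m][k]:
--                 dp[k] = max(dp[k], dp[m - 1] + k - m + 1)
--         dp[k] = max(dp[k], dp[k - 1])
--
--     return dp[n - 1]
-- ===== SOURCE B (Python) =====
-- def max_removable_blocks(n, weights):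
--     memo = {}
--
--     def removable(l, r):
--         # only even-length segments (odd r - l) can be removed entirely
--         if r <= l or (r - l) % 2 == 0:
--             return False
--         if r == l + 1:
--             return abs(weights[r] - weights[l]) <= 1
--         key = (l, r)
--         if key in memo:
--             return memo[key]
--         res = False
--         # a split must cut into two even-length removable halves, so only odd k - l matter
--         for k in range(l + 1, r, 2):
--             if removable(l, k) and removable(k + 1, r):
--                 res = True
--                 break
--         if not res:
--             res = abs(weights[l] - weights[r]) <= 1 and removable(l + 1, r - 1)
--         memo[key] = res
--         return res
--
--     dp = [0] * (n + 1)
--     for k in range(n):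
--         best = dp[k]
--         for m in range(k):
--             if removable(m, k):
--                 best = max(best, dp[m] + (k - m + 1))
--         dp[k + 1] = best
--     return dp[n]
-- ===== Notes on version B (the rewrite author's own statement) =====
-- stated objective: alternative
-- what changed: Replaces A's bottom-up odd-gap check table (triple nested loop with break and guard re-reads) by a memoized top-down recursion removable(l, r) that prunes even-length segments and odd split points, and A's in-place dp list with wraparound dp[-1]/dp[k-1] reads by a 1-based dp whose entry k+1 starts from dp[k].
import Mathlib
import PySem

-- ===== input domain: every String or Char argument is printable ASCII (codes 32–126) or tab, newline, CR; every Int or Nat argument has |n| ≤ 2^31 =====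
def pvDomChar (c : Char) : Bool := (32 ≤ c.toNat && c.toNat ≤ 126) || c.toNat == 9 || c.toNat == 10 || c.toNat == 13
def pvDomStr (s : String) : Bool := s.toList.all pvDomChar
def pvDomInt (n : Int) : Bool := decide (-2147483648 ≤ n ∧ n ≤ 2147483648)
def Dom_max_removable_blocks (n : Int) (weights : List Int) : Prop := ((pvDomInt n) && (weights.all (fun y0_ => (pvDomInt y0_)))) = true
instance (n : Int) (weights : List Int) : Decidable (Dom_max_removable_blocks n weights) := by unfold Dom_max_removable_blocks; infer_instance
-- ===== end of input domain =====

-- B replaces A's bottom-up odd-gap `check` table (triple loop with break) by a memoized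
-- top-down recursion removable(l, r), and A's in-place dp list with wraparound dp[-1]
-- reads by a 1-based dp whose row k+1 starts from dp[k]; an alternative, same values.

-- ===== PORT A =====
-- check[a][b] = True is modelled as updating a Bool-valued function of the two indices
def pvSet (ch : Int → Int → Bool) (p q : Int) : Int → Int → Bool :=
  fun a b => if a = p ∧ b = q then true else ch a b

-- Python list indexing of an in-range (possibly negative) index into a list of length `len`
def pvWrap (len i : Int) : Int := if i < 0 then i + len else i

def max_removable_blocks (n : Int) (weights : List Int) : Int :=
  if n = 0 then 0
  else
    -- check = [[False] * n for _ in range(n)], as a function on index pairs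
    let check := (fun _ _ => false : Int → Int → Bool)
    let check := (PySem.List.pyRange 0 (n - 1) 1).foldl (fun ch i =>
      if |PySem.List.pyGetD weights (i + 1) 0 - PySem.List.pyGetD weights i 0| ≤ 1
      then pvSet ch i (i + 1) else ch) check
    -- (the `break` only skips iterations whose guard `not check[j][j+i]` is already False)
    let check := (PySem.List.pyRange 3 n 2).foldl (fun ch i =>
      (PySem.List.pyRange 0 (n - i) 1).foldl (fun ch j =>
        let ch2 := (PySem.List.pyRange (j + 1) (j + i) 1).foldl (fun ch k =>
          if !ch j (j + i) && ch j k && ch (k + 1) (j + i) then pvSet ch j (j + i) else ch) ch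
        if !ch2 j (j + i) &&
            decide (|PySem.List.pyGetD weights j 0 - PySem.List.pyGetD weights (j + i) 0| ≤ 1) &&
            ch2 (j + 1) (j + i - 1)
        then pvSet ch2 j (j + i) else ch2) ch) check
    -- dp = [0] * (n + 1), as a function; negative reads wrap by + (n+1) as in Python
    let dp := (fun _ => (0 : Int) : Int → Int)
    let dp := (PySem.List.pyRange 0 n 1).foldl (fun dp k =>
      let dp := (PySem.List.pyRange 0 k 1).foldl (fun dp m =>
        if check m k
        then fun x => if x == k then max (dp k) (dp (pvWrap (n + 1) (m - 1)) + k - m + 1) else dp x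
        else dp) dp
      fun x => if x == k then max (dp k) (dp (pvWrap (n + 1) (k - 1))) else dp x) dp
    dp (pvWrap (n + 1) (n - 1))

-- ===== PORT B =====
-- removable(l, r) of Source B (memoization only caches values, so the port is the plain
-- recursion; the k loop of Source B runs over range(l+1, r, 2), i.e. k = l+1+2t for
-- t < (r-l)//2, and the break/res shape is the short-circuit || below)
def pvRem (w : List Int) (l r : Nat) : Bool :=
  if _h1 : r ≤ l ∨ (r - l) % 2 = 0 then false
  else if _h2 : r = l + 1 then decide (|w.getD r 0 - w.getD l 0| ≤ 1)
  else
    ((List.range ((r - l) / 2)).attach.any (fun t =>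
        pvRem w l (l + 1 + 2 * t.1) && pvRem w (l + 1 + 2 * t.1 + 1) r))
      || (decide (|w.getD l 0 - w.getD r 0| ≤ 1) && pvRem w (l + 1) (r - 1))
termination_by r - l
decreasing_by
  · have := List.mem_range.mp t.2; omega
  · have := List.mem_range.mp t.2; omega
  · omega

-- dp of Source B: dp[k+1] starts from dp[k] and folds the candidate splits m < k
def pvDp (w : List Int) : Nat → Int
  | 0 => 0
  | k + 1 =>
    (List.range k).attach.foldl (fun best m =>
      if pvRem w m.1 k then max best (pvDp w m.1 + ((k : Int) - m.1 + 1)) else best) (pvDp w k)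
termination_by k => k
decreasing_by
  · have := List.mem_range.mp m.2; omega
  · omega

def max_removable_blocks_alt (n : Int) (weights : List Int) : Int := pvDp weights n.toNat

-- ===== PRECONDITION & SPEC =====
-- A raises IndexError when n < 0 (dp[n-1] indexes an empty dp list) and when 2 ≤ n exceeds
-- len(weights) (weights[i] out of range); n = 1 returns 0 without reading weights.
def Pre_max_removable_blocks (n : Int) (weights : List Int) : Prop :=
  0 ≤ n ∧ (n ≤ (weights.length : Int) ∨ n = 1)
instance (n : Int) (weights : List Int) : Decidable (Pre_max_removable_blocks n weights) := by
  unfold Pre_max_removable_blocks; infer_instance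

def pvWitness_max_removable_blocks : Int × List Int := (4, [2, 1, 5, 5])

def Spec_max_removable_blocks (n : Int) (weights : List Int) (out : Int) : Prop :=
  out = max_removable_blocks_alt n weights
instance (n : Int) (weights : List Int) (out : Int) : Decidable (Spec_max_removable_blocks n weights out) := by
  unfold Spec_max_removable_blocks; infer_instance

-- ===== CLAIM (what is proved, stated in full; the proofs are below) =====
def Claim_equal_max_removable_blocks : Prop := ∀ (n : Int) (weights : List Int), Dom_max_removable_blocks n weights → Pre_max_removable_blocks n weights → Spec_max_removable_blocks n weights (max_removable_blocks n weights)

-- ===== LEMMAS AND PROOFS =====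

theorem pvSet_cell (ch : Int → Int → Bool) (p q : Int) : pvSet ch p q p q = true := by
  simp [pvSet]

theorem pvSet_off (ch : Int → Int → Bool) (p q a b : Int) (h : ¬(a = p ∧ b = q)) :
    pvSet ch p q a b = ch a b := by
  simp only [pvSet, if_neg h]

theorem list_any_attach {α : Type} (l : List α) (f : α → Bool) :
    (l.attach.any fun t => f t.1) = l.any f := by
  rw [Bool.eq_iff_iff]
  simp only [List.any_eq_true, List.mem_attach, true_and, Subtype.exists]
  constructor
  · rintro ⟨x, hx, h⟩; exact ⟨x, hx, h⟩
  · rintro ⟨x, hx, h⟩; exact ⟨x, hx, h⟩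

theorem pvRem_base (w : List Int) (l r : Nat) (h : r ≤ l) : pvRem w l r = false := by
  rw [pvRem, dif_pos (Or.inl h)]

theorem pvRem_even (w : List Int) (l r : Nat) (hpar : (r - l) % 2 = 0) :
    pvRem w l r = false := by
  rw [pvRem, dif_pos (Or.inr hpar)]

theorem pvRem_adj (w : List Int) (l : Nat) :
    pvRem w l (l + 1) = decide (|w.getD (l + 1) 0 - w.getD l 0| ≤ 1) := by
  rw [pvRem, dif_neg (by omega), dif_pos rfl]

theorem pvRem_unfold (w : List Int) (l r : Nat) (h : l + 2 ≤ r) (hodd : (r - l) % 2 = 1) :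
    pvRem w l r =
      (((List.range ((r - l) / 2)).any fun t =>
          pvRem w l (l + 1 + 2 * t) && pvRem w (l + 1 + 2 * t + 1) r)
        || (decide (|w.getD l 0 - w.getD r 0| ≤ 1) && pvRem w (l + 1) (r - 1))) := by
  rw [pvRem]
  rw [dif_neg (by omega), dif_neg (by omega),
    list_any_attach (List.range ((r - l) / 2))
      (fun t => pvRem w l (l + 1 + 2 * t) && pvRem w (l + 1 + 2 * t + 1) r)]

theorem pvRem_iff (w : List Int) (l r : Nat) (h : l + 2 ≤ r) (hodd : (r - l) % 2 = 1) :
    pvRem w l r = true ↔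
      ((∃ k : Nat, l < k ∧ k < r ∧ pvRem w l k = true ∧ pvRem w (k + 1) r = true)
        ∨ (|w.getD l 0 - w.getD r 0| ≤ 1 ∧ pvRem w (l + 1) (r - 1) = true)) := by
  rw [pvRem_unfold w l r h hodd]
  simp only [Bool.or_eq_true, Bool.and_eq_true, List.any_eq_true, List.mem_range,
    decide_eq_true_eq]
  constructor
  · rintro (⟨t, ht, h1, h2⟩ | h)
    · exact Or.inl ⟨l + 1 + 2 * t, by omega, by omega, h1, h2⟩
    · exact Or.inr h
  · rintro (⟨k, hk1, hk2, h1, h2⟩ | h)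
    · have hko : (k - l) % 2 = 1 := by
        by_contra hpar
        have hf : pvRem w l k = false := pvRem_even w l k (by omega)
        rw [hf] at h1
        exact absurd h1 (by simp)
      refine Or.inl ⟨(k - l - 1) / 2, by omega, ?_, ?_⟩
      · have e : l + 1 + 2 * ((k - l - 1) / 2) = k := by omega
        rw [e]; exact h1
      · have e : l + 1 + 2 * ((k - l - 1) / 2) + 1 = k + 1 := by omega
        rw [e]; exact h2
    · exact Or.inr h

theorem pvDp_eq (w : List Int) (k : Nat) :
    pvDp w (k + 1) =
      (List.range k).foldl (fun best m =>
        if pvRem w m k then max best (pvDp w m + ((k : Int) - m + 1)) else best) (pvDp w k) := by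
  rw [pvDp]
  exact List.foldl_attach
    (f := fun best m => if pvRem w m k then max best (pvDp w m + ((k : Int) - m + 1)) else best)
    (b := pvDp w k)

theorem foldl_max_le (c : Nat → Bool) (f : Nat → Int) :
    ∀ (L : List Nat) (a : Int),
      a ≤ L.foldl (fun x m => if c m then max x (f m) else x) a := by
  intro L
  induction L with
  | nil => intro a; exact le_rfl
  | cons x L ih =>
    intro a
    simp only [List.foldl_cons]
    refine le_trans ?_ (ih _)
    by_cases hc : c x = true
    · simp [hc]
    · simp [hc]

theorem foldl_max_comm (c : Nat → Bool) (f : Nat → Int) :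
    ∀ (L : List Nat) (a d : Int),
      L.foldl (fun x m => if c m then max x (f m) else x) (max a d)
        = max (L.foldl (fun x m => if c m then max x (f m) else x) a) d := by
  intro L
  induction L with
  | nil => intro a d; rfl
  | cons x L ih =>
    intro a d
    simp only [List.foldl_cons]
    by_cases hc : c x = true
    · simp only [hc, if_pos]
      rw [show max (max a d) (f x) = max (max a (f x)) d from max_right_comm a d (f x)]
      exact ih _ _
    · simp only [hc]
      simp only [Bool.false_eq_true, if_false]
      exact ih _ _

theorem pvDp_nonneg (w : List Int) : ∀ k : Nat, 0 ≤ pvDp w k := by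
  intro k
  induction k with
  | zero => simp [pvDp]
  | succ k ih =>
    rw [pvDp_eq]
    exact le_trans ih (foldl_max_le _ _ _ _)

theorem L_kfold (j i : Int) (L : List Int) (hL : ∀ k ∈ L, j < k ∧ k < j + i) :
    ∀ (ch : Int → Int → Bool) (a b : Int),
      (L.foldl (fun ch k =>
          if !ch j (j + i) && ch j k && ch (k + 1) (j + i) then pvSet ch j (j + i) else ch) ch) a b
        = if a = j ∧ b = j + i then (ch j (j + i) || L.any fun k => ch j k && ch (k + 1) (j + i))
          else ch a b := by
  induction L with
  | nil => intro ch a b; by_cases hab : a = j ∧ b = j + i <;> simp [hab]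
  | cons x L ih =>
    intro ch a b
    have hx := hL x (by simp)
    have hL' : ∀ k ∈ L, j < k ∧ k < j + i := fun k hk => hL k (by simp [hk])
    simp only [List.foldl_cons, List.any_cons]
    by_cases hg : (!ch j (j + i) && ch j x && ch (x + 1) (j + i)) = true
    · rw [if_pos hg, ih hL']
      simp only [Bool.and_eq_true, Bool.not_eq_eq_eq_not, Bool.not_true] at hg
      obtain ⟨⟨hc, h1⟩, h2⟩ := hg
      by_cases hab : a = j ∧ b = j + i
      · rw [if_pos hab, if_pos hab, pvSet_cell]
        simp [h1, h2]
      · rw [if_neg hab, if_neg hab, pvSet_off _ _ _ _ _ hab]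
    · rw [if_neg hg, ih hL']
      by_cases hab : a = j ∧ b = j + i
      · rw [if_pos hab, if_pos hab]
        by_cases hc : ch j (j + i) = true
        · simp [hc]
        · simp only [Bool.not_eq_true] at hc
          have hfx : (ch j x && ch (x + 1) (j + i)) = false := by
            by_contra hne
            apply hg
            simp only [Bool.and_eq_true, Bool.not_eq_eq_eq_not, Bool.not_true]
            rcases Bool.eq_false_or_eq_true (ch j x && ch (x + 1) (j + i)) with h | h
            · simp only [Bool.and_eq_true] at h
              exact ⟨⟨hc, h.1⟩, h.2⟩
            · exact absurd h hne
          simp [hc, hfx]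
      · rw [if_neg hab, if_neg hab]

-- proof-layer mirrors of the let-bound stages of port A (definitionally equal pieces)
def pvP1 (w : List Int) (n : Int) : Int → Int → Bool :=
  (PySem.List.pyRange 0 (n - 1) 1).foldl (fun ch i =>
    if |PySem.List.pyGetD w (i + 1) 0 - PySem.List.pyGetD w i 0| ≤ 1
    then pvSet ch i (i + 1) else ch) (fun _ _ => false)

def pvJB (w : List Int) (i : Int) (ch : Int → Int → Bool) (j : Int) : Int → Int → Bool :=
  let ch2 := (PySem.List.pyRange (j + 1) (j + i) 1).foldl (fun ch k =>
    if !ch j (j + i) && ch j k && ch (k + 1) (j + i) then pvSet ch j (j + i) else ch) ch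
  if !ch2 j (j + i) &&
      decide (|PySem.List.pyGetD w j 0 - PySem.List.pyGetD w (j + i) 0| ≤ 1) &&
      ch2 (j + 1) (j + i - 1)
  then pvSet ch2 j (j + i) else ch2

def pvP2 (w : List Int) (n : Int) : Int → Int → Bool :=
  (PySem.List.pyRange 3 n 2).foldl (fun ch i =>
    (PySem.List.pyRange 0 (n - i) 1).foldl (pvJB w i) ch) (pvP1 w n)

def pvDPA (w : List Int) (n : Int) : Int → Int :=
  (PySem.List.pyRange 0 n 1).foldl (fun dp k =>
    let dp := (PySem.List.pyRange 0 k 1).foldl (fun dp m =>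
      if pvP2 w n m k
      then fun x => if x == k then max (dp k) (dp (pvWrap (n + 1) (m - 1)) + k - m + 1) else dp x
      else dp) dp
    fun x => if x == k then max (dp k) (dp (pvWrap (n + 1) (k - 1))) else dp x) (fun _ => (0 : Int))

theorem portA_eq (n : Int) (w : List Int) :
    max_removable_blocks n w = if n = 0 then 0 else pvDPA w n (pvWrap (n + 1) (n - 1)) := rfl

def pvChInv (w : List Int) (N : Nat) (G : Int) (ch : Int → Int → Bool) : Prop :=
  ∀ a b : Int, 0 ≤ a → 0 ≤ b →
    ch a b = (decide (b < (N : Int)) && decide (b - a ≤ G) && pvRem w a.toNat b.toNat)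

def pvChInvP (w : List Int) (N : Nat) (i T : Int) (ch : Int → Int → Bool) : Prop :=
  ∀ a b : Int, 0 ≤ a → 0 ≤ b →
    ch a b = (decide (b < (N : Int)) &&
      (decide (b - a ≤ i - 2) || (decide (b - a = i) && decide (a < T))) &&
      pvRem w a.toNat b.toNat)

theorem pyGetD_toNat (w : List Int) (x : Int) (hx : 0 ≤ x) :
    PySem.List.pyGetD w x 0 = w.getD x.toNat 0 := by
  conv_lhs => rw [← Int.toNat_of_nonneg hx]
  exact PySem.List.pyGetD_natCast w x.toNat 0

theorem L_phase1_aux (w : List Int) :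
    ∀ (t : Nat) (a b : Int),
      ((List.range t).foldl (fun (ch : Int → Int → Bool) (k : Nat) =>
        if |PySem.List.pyGetD w ((0 + (k : Int)) + 1) 0 - PySem.List.pyGetD w (0 + (k : Int)) 0| ≤ 1
        then pvSet ch (0 + (k : Int)) ((0 + (k : Int)) + 1) else ch) (fun _ _ => false)) a b
      = (decide (0 ≤ a) && decide (a < (t : Int)) && decide (b = a + 1) &&
          decide (|w.getD (a.toNat + 1) 0 - w.getD a.toNat 0| ≤ 1)) := by
  intro t
  induction t with
  | zero => intro a b; simp
  | succ t ih =>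
    intro a b
    rw [List.range_succ, List.foldl_append, List.foldl_cons, List.foldl_nil]
    by_cases hab : a = 0 + (t : Int) ∧ b = (0 + (t : Int)) + 1
    · obtain ⟨rfl, rfl⟩ := hab
      by_cases hcond :
          |PySem.List.pyGetD w ((0 + (t : Int)) + 1) 0 - PySem.List.pyGetD w (0 + (t : Int)) 0| ≤ 1
      · rw [if_pos hcond, pvSet_cell]
        have hget : |w.getD ((0 + (t : Int)).toNat + 1) 0 - w.getD (0 + (t : Int)).toNat 0| ≤ 1 := by
          have e1 : ((0 : Int) + (t : Int)) + 1 = ((t + 1 : Nat) : Int) := by push_cast; ring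
          have e2 : ((0 : Int) + (t : Int)) = ((t : Nat) : Int) := by omega
          rw [e1, e2, PySem.List.pyGetD_natCast, PySem.List.pyGetD_natCast] at hcond
          have e3 : ((0 : Int) + (t : Int)).toNat = t := by omega
          rw [e3]
          exact hcond
        rw [decide_eq_true (by omega : (0 : Int) ≤ 0 + (t : Int)),
          decide_eq_true (by omega : (0 : Int) + (t : Int) < ((t + 1 : Nat) : Int)),
          decide_eq_true rfl, decide_eq_true hget]
        simp
      · rw [if_neg hcond, ih]
        have hget : ¬ |w.getD ((0 + (t : Int)).toNat + 1) 0 - w.getD (0 + (t : Int)).toNat 0| ≤ 1 := by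
          have e1 : ((0 : Int) + (t : Int)) + 1 = ((t + 1 : Nat) : Int) := by push_cast; ring
          have e2 : ((0 : Int) + (t : Int)) = ((t : Nat) : Int) := by omega
          rw [e1, e2, PySem.List.pyGetD_natCast, PySem.List.pyGetD_natCast] at hcond
          have e3 : ((0 : Int) + (t : Int)).toNat = t := by omega
          rw [e3]
          exact hcond
        rw [decide_eq_false (by omega : ¬ ((0 : Int) + (t : Int) < (t : Int))),
          decide_eq_false hget]
        simp
    · have hoff : ∀ ch : Int → Int → Bool,
          (if |PySem.List.pyGetD w ((0 + (t : Int)) + 1) 0 - PySem.List.pyGetD w (0 + (t : Int)) 0| ≤ 1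
           then pvSet ch (0 + (t : Int)) ((0 + (t : Int)) + 1) else ch) a b = ch a b := by
        intro ch
        by_cases hcond :
            |PySem.List.pyGetD w ((0 + (t : Int)) + 1) 0 - PySem.List.pyGetD w (0 + (t : Int)) 0| ≤ 1
        · rw [if_pos hcond, pvSet_off _ _ _ _ _ hab]
        · rw [if_neg hcond]
      rw [hoff, ih]
      by_cases hb1 : b = a + 1
      · subst hb1
        have hne : ¬ (a < (t : Int)) ∨ ¬ (a < ((t + 1 : Nat) : Int)) ∨ ((a < (t : Int)) ∧ (a < ((t + 1 : Nat) : Int))) := by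
          by_cases h1 : a < (t : Int)
          · exact Or.inr (Or.inr ⟨h1, by push_cast; omega⟩)
          · exact Or.inl h1
        have heq : decide (a < (t : Int)) = decide (a < ((t + 1 : Nat) : Int)) := by
          apply decide_eq_decide.mpr
          constructor
          · intro h; push_cast; omega
          · intro h
            by_contra hlt
            apply hab
            constructor
            · push_cast at h ⊢; omega
            · push_cast at h ⊢; omega
        rw [heq]
      · rw [decide_eq_false hb1]
        simp

theorem L_phase1 (w : List Int) (N : Nat) : pvChInv w N 1 (pvP1 w ↑N) := by
  intro a b ha hb
  unfold pvP1
  rw [PySem.List.pyRange_one, List.foldl_map]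
  have hT : (((N : Int) - 1 - 0)).toNat = N - 1 := by omega
  rw [hT, L_phase1_aux w (N - 1) a b]
  by_cases hb1 : b = a + 1
  · subst hb1
    have hrem : pvRem w a.toNat (a + 1).toNat = decide (|w.getD (a.toNat + 1) 0 - w.getD a.toNat 0| ≤ 1) := by
      have e : (a + 1).toNat = a.toNat + 1 := by omega
      rw [e, pvRem_adj]
    rw [hrem, decide_eq_true ha,
      show decide (a < ((N - 1 : Nat) : Int)) = decide (a + 1 < (N : Int)) from
        decide_eq_decide.mpr (by constructor <;> (intro h; omega)),
      decide_eq_true rfl,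
      show (decide (a + 1 - a ≤ 1)) = true from decide_eq_true (by omega)]
    simp
  · rw [decide_eq_false hb1]
    by_cases hble : b ≤ a
    · have hrem : pvRem w a.toNat b.toNat = false := pvRem_base w _ _ (by omega)
      rw [hrem]
      simp
    · have hd : decide (b - a ≤ 1) = false := decide_eq_false (by omega)
      rw [hd]
      simp

theorem L_jstep (w : List Int) (N : Nat) (i j : Int) (ch : Int → Int → Bool)
    (hi3 : 3 ≤ i) (hodd : i % 2 = 1) (hj : 0 ≤ j) (hjn : j + i < (N : Int))
    (hch : pvChInvP w N i j ch) : pvChInvP w N i (j + 1) (pvJB w i ch j) := by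
  intro a b ha hb
  unfold pvJB
  have hmem : ∀ k ∈ PySem.List.pyRange (j + 1) (j + i) 1, j < k ∧ k < j + i := by
    intro k hk
    rw [PySem.List.mem_pyRange_one] at hk
    omega
  have hk2 := L_kfold j i (PySem.List.pyRange (j + 1) (j + i) 1) hmem ch
  have hVcell : ch j (j + i) = false := by
    rw [hch j (j + i) hj (by omega)]
    have e : j + i - j = i := by ring
    rw [e, decide_eq_false (show ¬ (i ≤ i - 2) by omega),
      decide_eq_false (show ¬ (j < j) by omega)]
    simp
  have hW : ch (j + 1) (j + i - 1) = pvRem w (j + 1).toNat (j + i - 1).toNat := by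
    rw [hch (j + 1) (j + i - 1) (by omega) (by omega)]
    have e : j + i - 1 - (j + 1) = i - 2 := by ring
    rw [e, decide_eq_true (show (j + i - 1 : Int) < (N : Int) by omega),
      decide_eq_true (show (i - 2 : Int) ≤ i - 2 from le_rfl)]
    simp
  have hAny : ((PySem.List.pyRange (j + 1) (j + i) 1).any
        fun k => ch j k && ch (k + 1) (j + i)) = true ↔
      (∃ k : Nat, j.toNat < k ∧ k < (j + i).toNat ∧ pvRem w j.toNat k = true ∧
        pvRem w (k + 1) (j + i).toNat = true) := by
    rw [List.any_eq_true]
    constructor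
    · rintro ⟨k, hkmem, hfk⟩
      rw [PySem.List.mem_pyRange_one] at hkmem
      rw [hch j k hj (by omega), hch (k + 1) (j + i) (by omega) (by omega)] at hfk
      simp only [Bool.and_eq_true] at hfk
      refine ⟨k.toNat, by omega, by omega, hfk.1.2, ?_⟩
      have e : (k + 1).toNat = k.toNat + 1 := by omega
      rw [← e]
      exact hfk.2.2
    · rintro ⟨K, h1, h2, hr1, hr2⟩
      refine ⟨(K : Int), ?_, ?_⟩
      · rw [PySem.List.mem_pyRange_one]
        omega
      · rw [hch j (K : Int) hj (by omega), hch ((K : Int) + 1) (j + i) (by omega) (by omega)]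
        have hodd1 : (K - j.toNat) % 2 = 1 := by
          by_contra hpar
          have : pvRem w j.toNat K = false := pvRem_even w j.toNat K (by omega)
          rw [this] at hr1
          exact absurd hr1 (by simp)
        have e1 : ((K : Int)).toNat = K := by omega
        have e2 : ((K : Int) + 1).toNat = K + 1 := by omega
        rw [e1, e2, hr1, hr2]
        rw [decide_eq_true (show (K : Int) < (N : Int) by omega),
          decide_eq_true (show (j + i : Int) < (N : Int) from hjn),
          decide_eq_true (show (K : Int) - j ≤ i - 2 by omega),
          decide_eq_true (show (j + i) - ((K : Int) + 1) ≤ i - 2 by omega)]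
        simp
  have hIff := pvRem_iff w j.toNat (j + i).toNat (by omega) (by omega)
  have hends : decide (|PySem.List.pyGetD w j 0 - PySem.List.pyGetD w (j + i) 0| ≤ 1)
      = decide (|w.getD j.toNat 0 - w.getD (j + i).toNat 0| ≤ 1) := by
    rw [pyGetD_toNat w j hj, pyGetD_toNat w (j + i) (by omega)]
  have hWnat : (j + 1).toNat = j.toNat + 1 := by omega
  have hW2nat : (j + i - 1).toNat = (j + i).toNat - 1 := by omega
  rw [apply_ite (fun g : Int → Int → Bool => g a b)]
  by_cases hab : a = j ∧ b = j + i
  · rw [hab.1, hab.2]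
    have hEcell : ((PySem.List.pyRange (j + 1) (j + i) 1).foldl (fun ch k =>
        if !ch j (j + i) && ch j k && ch (k + 1) (j + i) then pvSet ch j (j + i) else ch) ch) j (j + i)
        = ((PySem.List.pyRange (j + 1) (j + i) 1).any fun k => ch j k && ch (k + 1) (j + i)) := by
      rw [hk2, if_pos ⟨rfl, rfl⟩, hVcell]
      simp
    have hEW : ((PySem.List.pyRange (j + 1) (j + i) 1).foldl (fun ch k =>
        if !ch j (j + i) && ch j k && ch (k + 1) (j + i) then pvSet ch j (j + i) else ch) ch) (j + 1) (j + i - 1)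
        = pvRem w (j.toNat + 1) ((j + i).toNat - 1) := by
      rw [hk2, if_neg (by rintro ⟨h1, _⟩; omega), hW, hWnat, hW2nat]
    rw [hEcell, hEW, hends, pvSet_cell]
    have e : j + i - j = i := by ring
    rw [e, decide_eq_true (show (j + i : Int) < (N : Int) from hjn),
      decide_eq_false (show ¬ (i ≤ i - 2) by omega),
      decide_eq_true (show (i : Int) = i from rfl),
      decide_eq_true (show (j : Int) < j + 1 by omega)]
    simp only [Bool.false_or, Bool.and_true, Bool.true_and]
    by_cases hA : ((PySem.List.pyRange (j + 1) (j + i) 1).any fun k => ch j k && ch (k + 1) (j + i)) = true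
    · rw [hA]
      have hprem : pvRem w j.toNat (j + i).toNat = true := hIff.mpr (Or.inl (hAny.mp hA))
      rw [hprem]
      simp
    · have hA' : ((PySem.List.pyRange (j + 1) (j + i) 1).any fun k => ch j k && ch (k + 1) (j + i)) = false := by
        rcases Bool.eq_false_or_eq_true ((PySem.List.pyRange (j + 1) (j + i) 1).any fun k => ch j k && ch (k + 1) (j + i)) with h | h
        · exact absurd h hA
        · exact h
      rw [hA']
      simp only [Bool.not_false, Bool.true_and]
      rw [Bool.eq_iff_iff]
      constructor
      · intro hif
        by_cases hc : (decide (|w.getD j.toNat 0 - w.getD (j + i).toNat 0| ≤ 1) && pvRem w (j.toNat + 1) ((j + i).toNat - 1)) = true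
        · simp only [Bool.and_eq_true, decide_eq_true_eq] at hc
          exact hIff.mpr (Or.inr hc)
        · rw [if_neg hc] at hif
          exact absurd hif (by simp)
      · intro hprem
        rcases hIff.mp hprem with hsplit | ⟨h1, h2⟩
        · exact absurd (hAny.mpr hsplit) hA
        · rw [if_pos (by simp only [Bool.and_eq_true, decide_eq_true_eq]; exact ⟨h1, h2⟩)]
  · have hmid : (decide (b - a ≤ i - 2) || (decide (b - a = i) && decide (a < j)))
        = (decide (b - a ≤ i - 2) || (decide (b - a = i) && decide (a < j + 1))) := by
      by_cases hba : b - a = i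
      · by_cases haj : a = j
        · exact absurd ⟨haj, by omega⟩ hab
        · rw [show decide (a < j) = decide (a < j + 1) from
            decide_eq_decide.mpr ⟨fun h => by omega, fun h => by omega⟩]
      · rw [decide_eq_false hba]
        simp
    split_ifs with hg
    · rw [pvSet_off _ _ _ _ _ hab, hk2, if_neg hab, hch a b ha hb, hmid]
    · rw [hk2, if_neg hab, hch a b ha hb, hmid]

theorem L_inv_to_invP0 (w : List Int) (N : Nat) (i : Int) (ch : Int → Int → Bool)
    (hch : pvChInv w N (i - 2) ch) : pvChInvP w N i 0 ch := by
  intro a b ha hb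
  rw [hch a b ha hb, show decide (a < (0 : Int)) = false from decide_eq_false (by omega)]
  simp

theorem L_invP_to_inv (w : List Int) (N : Nat) (i : Int) (hi3 : 3 ≤ i) (hodd : i % 2 = 1)
    (ch : Int → Int → Bool) (hch : pvChInvP w N i ((N : Int) - i) ch) : pvChInv w N i ch := by
  intro a b ha hb
  rw [hch a b ha hb]
  by_cases hbN : b < (N : Int)
  · rw [decide_eq_true hbN]
    by_cases h1 : b - a ≤ i - 2
    · rw [decide_eq_true h1, decide_eq_true (show b - a ≤ i by omega)]
      simp
    · by_cases h2 : b - a = i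
      · rw [decide_eq_false h1, decide_eq_true h2, decide_eq_true (show b - a ≤ i by omega),
          decide_eq_true (show a < (N : Int) - i by omega)]
        simp
      · by_cases h3 : b - a = i - 1
        · have hR : pvRem w a.toNat b.toNat = false := pvRem_even w _ _ (by omega)
          rw [hR, decide_eq_false h1, decide_eq_false h2]
          simp
        · rw [decide_eq_false h1, decide_eq_false h2, decide_eq_false (show ¬ (b - a ≤ i) by omega)]
          simp
  · rw [decide_eq_false hbN]
    simp

theorem L_jloop_aux (w : List Int) (N : Nat) (i : Int) (hi3 : 3 ≤ i) (hodd : i % 2 = 1)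
    (ch : Int → Int → Bool) (hch : pvChInvP w N i 0 ch) :
    ∀ t : Nat, (t : Int) + i ≤ (N : Int) →
      pvChInvP w N i (t : Int)
        ((List.range t).foldl (fun ch' (k : Nat) => pvJB w i ch' (0 + (k : Int))) ch) := by
  intro t
  induction t with
  | zero =>
    intro _
    simpa using hch
  | succ t ih =>
    intro ht
    rw [List.range_succ, List.foldl_append, List.foldl_cons, List.foldl_nil]
    have ih' := ih (by push_cast at ht ⊢; omega)
    have hst : pvChInvP w N i ((0 : Int) + (t : Int))
        ((List.range t).foldl (fun ch' (k : Nat) => pvJB w i ch' (0 + (k : Int))) ch) := by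
      intro a b ha hb
      rw [show ((0 : Int) + (t : Int)) = (t : Int) by omega]
      exact ih' a b ha hb
    have hstep := L_jstep w N i (0 + (t : Int)) _ hi3 hodd (by omega)
      (by push_cast at ht ⊢; omega) hst
    intro a b ha hb
    rw [hstep a b ha hb,
      show ((0 : Int) + (t : Int) + 1) = ((t + 1 : Nat) : Int) by push_cast; ring]

theorem L_jloop (w : List Int) (N : Nat) (i : Int) (hi3 : 3 ≤ i) (hodd : i % 2 = 1)
    (hin : i < (N : Int)) (ch : Int → Int → Bool) (hch : pvChInv w N (i - 2) ch) :
    pvChInv w N i ((PySem.List.pyRange 0 ((N : Int) - i) 1).foldl (pvJB w i) ch) := by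
  rw [PySem.List.pyRange_one, List.foldl_map]
  have ht0 : ((((N : Int) - i - 0)).toNat : Int) = (N : Int) - i := by omega
  apply L_invP_to_inv w N i hi3 hodd
  have haux := L_jloop_aux w N i hi3 hodd ch (L_inv_to_invP0 w N i ch hch)
    (((N : Int) - i - 0)).toNat (by omega)
  intro a b ha hb
  rw [haux a b ha hb, ht0]

theorem L_iloop_aux (w : List Int) (N : Nat) :
    ∀ t : Nat, (∀ s : Nat, s < t → 3 + 2 * (s : Int) < (N : Int)) →
      pvChInv w N (1 + 2 * (t : Int))
        ((List.range t).foldl (fun ch (k : Nat) =>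
          (PySem.List.pyRange 0 ((N : Int) - (3 + 2 * (k : Int))) 1).foldl
            (pvJB w (3 + 2 * (k : Int))) ch) (pvP1 w (N : Int))) := by
  intro t
  induction t with
  | zero =>
    intro _
    intro a b ha hb
    rw [List.range_zero, List.foldl_nil]
    have := L_phase1 w N a b ha hb
    rw [this, show ((1 : Int) + 2 * ((0 : Nat) : Int)) = 1 by push_cast]
  | succ t ih =>
    intro hvalid
    rw [List.range_succ, List.foldl_append, List.foldl_cons, List.foldl_nil]
    have ih' := ih (fun s hs => hvalid s (by omega))
    have hst : pvChInv w N (3 + 2 * (t : Int) - 2)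
        ((List.range t).foldl (fun ch (k : Nat) =>
          (PySem.List.pyRange 0 ((N : Int) - (3 + 2 * (k : Int))) 1).foldl
            (pvJB w (3 + 2 * (k : Int))) ch) (pvP1 w (N : Int))) := by
      intro a b ha hb
      rw [show (3 + 2 * (t : Int) - 2) = 1 + 2 * (t : Int) by ring]
      exact ih' a b ha hb
    have hstep := L_jloop w N (3 + 2 * (t : Int)) (by omega) (by omega)
      (hvalid t (by omega)) _ hst
    intro a b ha hb
    rw [hstep a b ha hb,
      show (3 + 2 * (t : Int)) = 1 + 2 * ((t + 1 : Nat) : Int) by push_cast; ring]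

theorem L_check (w : List Int) (N : Nat) (hN : 1 ≤ N) :
    ∀ a b : Int, 0 ≤ a → 0 ≤ b → b < (N : Int) →
      pvP2 w (N : Int) a b = pvRem w a.toNat b.toNat := by
  unfold pvP2
  rw [PySem.List.pyRange_of_pos 3 (N : Int) (by norm_num), List.foldl_map]
  set C : Nat := (if (3 : Int) < (N : Int) then (((N : Int) - 3 + 2 - 1) / 2).toNat else 0) with hCdef
  have hCfacts : ((3 : Int) < (N : Int) → 2 * (C : Int) ≥ (N : Int) - 3 ∧ 2 * (C : Int) ≤ (N : Int) - 2)
      ∧ (¬ ((3 : Int) < (N : Int)) → C = 0) := by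
    constructor
    · intro h3
      rw [hCdef, if_pos h3]
      omega
    · intro h3
      rw [hCdef, if_neg h3]
  have hinv := L_iloop_aux w N C (by
    intro s hs
    have h3 : (3 : Int) < (N : Int) := by
      by_contra hc
      rw [hCfacts.2 hc] at hs
      omega
    have := (hCfacts.1 h3).2
    omega)
  intro a b ha hb hbN
  rw [hinv a b ha hb, decide_eq_true hbN]
  by_cases hg : b - a ≤ 1 + 2 * (C : Int)
  · rw [decide_eq_true hg]
    simp
  · rw [decide_eq_false hg]
    have hR : pvRem w a.toNat b.toNat = false := pvRem_even w _ _ (by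
      by_cases h3 : (3 : Int) < (N : Int)
      · have := hCfacts.1 h3
        omega
      · have := hCfacts.2 h3
        omega)
    rw [hR]
    simp

theorem L_dpinner_aux (w : List Int) (N : Nat) (hN : 1 ≤ N) (K : Nat) (hK : K < N)
    (dpf : Int → Int)
    (hdp : ∀ x : Int, dpf x = if 0 ≤ x ∧ x < (K : Int) then pvDp w (x.toNat + 1) else 0) :
    ∀ t : Nat, t ≤ K → ∀ x : Int,
      ((List.range t).foldl (fun (dp : Int → Int) (m : Nat) =>
        if pvP2 w (N : Int) (0 + (m : Int)) (K : Int)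
        then fun x => if x == (K : Int) then
            max (dp (K : Int))
              (dp (pvWrap ((N : Int) + 1) ((0 + (m : Int)) - 1)) + (K : Int) - (0 + (m : Int)) + 1)
          else dp x
        else dp) dpf) x
      = if x = (K : Int) then
          (List.range t).foldl (fun best m =>
            if pvRem w m K then max best (pvDp w m + ((K : Int) - (m : Int) + 1)) else best) 0
        else dpf x := by
  intro t
  induction t with
  | zero =>
    intro _ x
    rw [List.range_zero, List.foldl_nil, List.foldl_nil]
    by_cases hx : x = (K : Int)
    · rw [if_pos hx, hx, hdp (K : Int), if_neg (by omega)]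
    · rw [if_neg hx]
  | succ t ih =>
    intro ht x
    rw [List.range_succ, List.foldl_append, List.foldl_append, List.foldl_cons,
      List.foldl_cons, List.foldl_nil, List.foldl_nil]
    have e0 : ((0 : Int) + (t : Int)) = (t : Int) := by omega
    rw [e0]
    have hcheck : pvP2 w (N : Int) (t : Int) (K : Int) = pvRem w t K := by
      rw [L_check w N hN (t : Int) (K : Int) (by omega) (by omega) (by omega)]
      simp
    rw [hcheck]
    by_cases hrem : pvRem w t K = true
    · rw [if_pos hrem, if_pos hrem]
      by_cases hx : x = (K : Int)
      · rw [if_pos (by simp [hx]), if_pos hx]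
        rw [ih (by omega) (K : Int), if_pos rfl]
        by_cases ht0 : t = 0
        · subst ht0
          have hwrap : pvWrap ((N : Int) + 1) (((0 : Nat) : Int) - 1) = (N : Int) := by
            unfold pvWrap
            rw [if_pos (by omega)]
            push_cast
            ring
          rw [hwrap, ih (by omega) (N : Int), if_neg (by omega), hdp (N : Int),
            if_neg (by omega)]
          rw [show pvDp w 0 = 0 from by simp [pvDp]]
          rw [show ((0 : Int) + (K : Int) - ((0 : Nat) : Int) + 1 : Int)
              = (0 : Int) + ((K : Int) - ((0 : Nat) : Int) + 1) from by ring]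
        · have hwrap : pvWrap ((N : Int) + 1) ((t : Int) - 1) = (t : Int) - 1 := by
            unfold pvWrap
            rw [if_neg (by omega)]
          rw [hwrap, ih (by omega) ((t : Int) - 1), if_neg (by omega), hdp ((t : Int) - 1),
            if_pos ⟨by omega, by omega⟩]
          have e1 : ((t : Int) - 1).toNat + 1 = t := by omega
          rw [e1]
          rw [show (pvDp w t + (K : Int) - (t : Int) + 1 : Int) = pvDp w t + ((K : Int) - (t : Int) + 1) from by ring]
      · rw [if_neg (by simp [hx]), ih (by omega) x, if_neg hx, if_neg hx]
    · rw [if_neg hrem, if_neg hrem]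
      exact ih (by omega) x

theorem L_dploop_aux (w : List Int) (N : Nat) (hN : 1 ≤ N) :
    ∀ t : Nat, t ≤ N → ∀ x : Int,
      ((List.range t).foldl (fun (dp : Int → Int) (k : Nat) =>
        let dp2 := (PySem.List.pyRange 0 (0 + (k : Int)) 1).foldl (fun dp m =>
          if pvP2 w (N : Int) m (0 + (k : Int))
          then fun x => if x == (0 + (k : Int)) then
              max (dp (0 + (k : Int))) (dp (pvWrap ((N : Int) + 1) (m - 1)) + (0 + (k : Int)) - m + 1)
            else dp x
          else dp) dp
        fun x => if x == (0 + (k : Int)) then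
            max (dp2 (0 + (k : Int))) (dp2 (pvWrap ((N : Int) + 1) ((0 + (k : Int)) - 1)))
          else dp2 x) (fun _ => (0 : Int))) x
      = if 0 ≤ x ∧ x < (t : Int) then pvDp w (x.toNat + 1) else 0 := by
  intro t
  induction t with
  | zero =>
    intro _ x
    rw [List.range_zero, List.foldl_nil, if_neg (by omega)]
  | succ t ih =>
    intro ht x
    rw [List.range_succ, List.foldl_append, List.foldl_cons, List.foldl_nil]
    simp only []
    have e0 : ((0 : Int) + (t : Int)) = (t : Int) := by omega
    rw [e0]
    rw [PySem.List.pyRange_one 0 (t : Int), List.foldl_map,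
      show (((t : Int) - 0)).toNat = t from by omega]
    have hst : ∀ y : Int,
        ((List.range t).foldl (fun (dp : Int → Int) (k : Nat) =>
          let dp2 := (PySem.List.pyRange 0 (0 + (k : Int)) 1).foldl (fun dp m =>
            if pvP2 w (N : Int) m (0 + (k : Int))
            then fun x => if x == (0 + (k : Int)) then
                max (dp (0 + (k : Int))) (dp (pvWrap ((N : Int) + 1) (m - 1)) + (0 + (k : Int)) - m + 1)
              else dp x
            else dp) dp
          fun x => if x == (0 + (k : Int)) then
              max (dp2 (0 + (k : Int))) (dp2 (pvWrap ((N : Int) + 1) ((0 + (k : Int)) - 1)))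
            else dp2 x) (fun _ => (0 : Int))) y
        = if 0 ≤ y ∧ y < (t : Int) then pvDp w (y.toNat + 1) else 0 := ih (by omega)
    have hinner := L_dpinner_aux w N hN t (by omega) _ hst t le_rfl
    have haccK : max ((List.range t).foldl (fun best m =>
          if pvRem w m t then max best (pvDp w m + ((t : Int) - (m : Int) + 1)) else best) 0)
        (pvDp w t) = pvDp w (t + 1) := by
      rw [pvDp_eq w t,
        show pvDp w t = max 0 (pvDp w t) from (max_eq_right (pvDp_nonneg w t)).symm,
        foldl_max_comm (fun m => pvRem w m t) (fun m => pvDp w m + ((t : Int) - (m : Int) + 1))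
          (List.range t) 0 (pvDp w t), max_eq_right (pvDp_nonneg w t)]
    by_cases hx : x = (t : Int)
    · rw [if_pos (by simp [hx]), hinner (t : Int), if_pos rfl]
      by_cases ht0 : t = 0
      · subst ht0
        rw [show pvWrap ((N : Int) + 1) ((((0 : Nat)) : Int) - 1) = (N : Int) from by
            unfold pvWrap; rw [if_pos (by omega)]; push_cast; ring]
        rw [hinner (N : Int), if_neg (by omega), hst (N : Int), if_neg (by omega)]
        have hkey := haccK
        rw [show pvDp w 0 = 0 from by simp [pvDp]] at hkey
        rw [hkey, if_pos ⟨by omega, by omega⟩, hx,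
          show ((((0 : Nat) : Int)).toNat + 1) = 0 + 1 from by omega]
      · rw [show pvWrap ((N : Int) + 1) ((t : Int) - 1) = (t : Int) - 1 from by
            unfold pvWrap; rw [if_neg (by omega)]]
        rw [hinner ((t : Int) - 1), if_neg (by omega), hst ((t : Int) - 1),
          if_pos ⟨by omega, by omega⟩, show (((t : Int) - 1).toNat + 1) = t from by omega]
        rw [haccK, if_pos ⟨by omega, by omega⟩, hx,
          show (((t : Nat) : Int).toNat + 1) = t + 1 from by omega]
    · rw [if_neg (by simp [hx]), hinner x, if_neg hx, hst x]
      by_cases hlt : 0 ≤ x ∧ x < (t : Int)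
      · rw [if_pos hlt, if_pos ⟨hlt.1, by push_cast; omega⟩]
      · rw [if_neg hlt, if_neg (by
          rintro ⟨h1, h2⟩
          apply hlt
          refine ⟨h1, ?_⟩
          push_cast at h2
          omega)]

theorem L_dploop (w : List Int) (N : Nat) (hN : 1 ≤ N) :
    ∀ x : Int, pvDPA w (N : Int) x = if 0 ≤ x ∧ x < (N : Int) then pvDp w (x.toNat + 1) else 0 := by
  intro x
  unfold pvDPA
  rw [PySem.List.pyRange_one 0 (N : Int), List.foldl_map,
    show (((N : Int) - 0)).toNat = N from by omega]
  exact L_dploop_aux w N hN N le_rfl x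

-- ===== VERDICT (by name: the statement is the Claim_ definition above) =====
theorem max_removable_blocks_spec : Claim_equal_max_removable_blocks := by
  unfold Claim_equal_max_removable_blocks
  intro n w _hdom hpre
  unfold Spec_max_removable_blocks max_removable_blocks_alt
  obtain ⟨hn0, _⟩ := hpre
  rw [portA_eq]
  by_cases hz : n = 0
  · rw [if_pos hz, hz]
    simp [pvDp]
  · rw [if_neg hz]
    have hn : n = ((n.toNat : Nat) : Int) := by omega
    rw [hn]
    have hN1 : 1 ≤ n.toNat := by omega
    rw [show pvWrap (((n.toNat : Nat) : Int) + 1) (((n.toNat : Nat) : Int) - 1)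
        = ((n.toNat : Nat) : Int) - 1 from by unfold pvWrap; rw [if_neg (by omega)]]
    rw [L_dploop w n.toNat hN1 (((n.toNat : Nat) : Int) - 1),
      if_pos ⟨by omega, by omega⟩,
      show ((((n.toNat : Nat) : Int) - 1).toNat + 1) = n.toNat from by omega,
      show (((n.toNat : Nat) : Int)).toNat = n.toNat from by omega]
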